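-- pv_equiv track=rewrite | github.com/HelayLiu/ZepCompare | code/fact_extraction/extract_new.py | map_functions_to_nodes
-- ===== SOURCE A (Python) =====
-- def map_functions_to_nodes(node_to_functions):
--     function_to_nodes = {}
--     for node, functions in node_to_functions.items():
--         for func in functions:
--             if func not in function_to_nodes:
--                 function_to_nodes[func] = set()
--             function_to_nodes[func].add(node)
--     return function_to_nodes
-- ===== SOURCE B (Python) =====
-- def map_functions_to_nodes(node_to_functions):
--     # Gather every distinct function (first-occurrence order), then for each
--     # function rescan the mapping collecting the nodes that mention it.
--     funcs = dict.fromkeys(f for fs in node_to_functions.values() for f in fs)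
--     return {f: {node for node, fs in node_to_functions.items() if f in fs}
--             for f in funcs}
-- ===== Notes on version B (the rewrite author's own statement) =====
-- stated objective: alternative
-- what changed: Replaces the single forward pass that mutates per-function set entries in a dict with a two-phase inversion: first collect the distinct functions from all value lists, then build each function's node set by an independent rescan of the whole mapping.
import Mathlib
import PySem

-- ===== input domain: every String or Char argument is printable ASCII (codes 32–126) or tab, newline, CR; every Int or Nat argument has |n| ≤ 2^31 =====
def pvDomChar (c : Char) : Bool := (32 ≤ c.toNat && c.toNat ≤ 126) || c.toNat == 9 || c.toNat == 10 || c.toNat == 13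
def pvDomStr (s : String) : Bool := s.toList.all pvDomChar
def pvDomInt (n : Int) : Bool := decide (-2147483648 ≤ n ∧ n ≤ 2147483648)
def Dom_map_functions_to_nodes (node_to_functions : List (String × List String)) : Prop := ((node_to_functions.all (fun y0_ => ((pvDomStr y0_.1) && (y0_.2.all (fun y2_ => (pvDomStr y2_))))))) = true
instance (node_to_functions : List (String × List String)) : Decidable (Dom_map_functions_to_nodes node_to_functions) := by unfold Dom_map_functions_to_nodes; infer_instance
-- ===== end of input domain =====

-- B inverts the node→functions map in two phases (distinct functions first, then a
-- per-function rescan of the mapping) instead of A's single mutating forward pass;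
-- objective: alternative decomposition, similar cost.

-- ===== PORT A =====
def map_functions_to_nodes (node_to_functions : List (String × List String)) : List (String × List String) :=
  let function_to_nodes : PySem.Dict String (PySem.Set String) :=
    node_to_functions.foldl (fun d p =>
      p.2.foldl (fun d func =>
        let d := if d.contains func then d else d.insert func PySem.Set.empty
        d.insert func (PySem.Set.add (d.getD func PySem.Set.empty) p.1)) d)
      PySem.Dict.empty
  function_to_nodes.items

-- ===== PORT B =====
def map_functions_to_nodes_alt (node_to_functions : List (String × List String)) : List (String × List String) :=
  let funcs : PySem.Set String := PySem.Set.ofList (node_to_functions.map Prod.snd).flatten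
  funcs.map (fun f =>
    (f, PySem.Set.ofList ((node_to_functions.filter (fun p => p.2.contains f)).map Prod.fst)))

-- ===== PRECONDITION & SPEC =====
def Spec_map_functions_to_nodes (node_to_functions : List (String × List String)) (out : List (String × List String)) : Prop := out = map_functions_to_nodes_alt node_to_functions
instance (node_to_functions : List (String × List String)) (out : List (String × List String)) : Decidable (Spec_map_functions_to_nodes node_to_functions out) := by unfold Spec_map_functions_to_nodes; infer_instance

-- ===== CLAIM (what is proved, stated in full; the proofs are below) =====
def Claim_equal_map_functions_to_nodes : Prop := ∀ (node_to_functions : List (String × List String)), Dom_map_functions_to_nodes node_to_functions → Spec_map_functions_to_nodes node_to_functions (map_functions_to_nodes node_to_functions)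

-- ===== LEMMAS AND PROOFS =====

-- the node set B computes for function f from the mapping l
def pvNodes (l : List (String × List String)) (f : String) : PySem.Set String :=
  PySem.Set.ofList ((l.filter (fun p => p.2.contains f)).map Prod.fst)

-- the distinct functions, in first-occurrence order
def pvKeys (l : List (String × List String)) : PySem.Set String :=
  PySem.Set.ofList (l.map Prod.snd).flatten

-- A's inner loop body for node n
def pvStepA (n : String) (d : PySem.Dict String (PySem.Set String)) (func : String) :
    PySem.Dict String (PySem.Set String) :=
  let d := if d.contains func then d else d.insert func PySem.Set.empty
  d.insert func (PySem.Set.add (d.getD func PySem.Set.empty) n)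

lemma pvNodes_not_mem (l : List (String × List String)) (f : String)
    (h : f ∉ (l.map Prod.snd).flatten) : pvNodes l f = [] := by
  unfold pvNodes
  have : l.filter (fun p => p.2.contains f) = [] := by
    apply List.filter_eq_nil_iff.mpr
    intro p hp hc
    exact h (List.mem_flatten.mpr ⟨p.2, List.mem_map.mpr ⟨p, hp, rfl⟩, by simpa using hc⟩)
  rw [this]
  rfl

lemma pvStepA_items (n f : String) (K : List String) (N : String → PySem.Set String)
    (hK : K.Nodup) (h0 : ∀ g, g ∉ K → N g = []) :
    (pvStepA n (PySem.Dict.mk (K.map fun g => (g, N g))) f).items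
      = (PySem.Set.add K f).map (fun g => (g, if f == g then PySem.Set.add (N g) n else N g)) := by
  have hkeys : (PySem.Dict.mk (K.map fun g => (g, N g))).keys = K := by
    simp [PySem.Dict.keys_mk, Function.comp_def]
  have hknd : (PySem.Dict.mk (K.map fun g => (g, N g))).keys.Nodup := by rw [hkeys]; exact hK
  by_cases hf : f ∈ K
  · have hc : (PySem.Dict.mk (K.map fun g => (g, N g))).contains f = true := by
      rw [PySem.Dict.contains_eq_decide_mem_keys, hkeys]; simpa using hf
    have hget : (PySem.Dict.mk (K.map fun g => (g, N g))).getD f PySem.Set.empty = N f :=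
      PySem.Dict.getD_of_mem_items _ ((List.mem_map (f := fun g => (g, N g))).mpr ⟨f, hf, rfl⟩) hknd _
    simp only [pvStepA, hc, if_true]
    rw [hget, PySem.Dict.items_insert_of_contains _ _ hc,
      PySem.Set.add_of_mem hf, List.map_map]
    apply List.map_congr_left
    intro g hg
    by_cases hgf : g = f
    · subst hgf; simp
    · simp [hgf, Ne.symm hgf]
  · have hc : (PySem.Dict.mk (K.map fun g => (g, N g))).contains f = false := by
      rw [PySem.Dict.contains_eq_decide_mem_keys, hkeys]; simpa using hf
    simp only [pvStepA, hc, Bool.false_eq_true, if_false]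
    rw [PySem.Dict.getD_insert_self,
      PySem.Dict.insert_insert_self, PySem.Dict.items_insert_of_not_contains _ _ hc,
      PySem.Set.add_of_not_mem hf, List.map_append]
    congr 1
    · apply List.map_congr_left
      intro g hg
      have : f ≠ g := fun h => hf (h ▸ hg)
      simp [this]
    · simp [h0 f hf]

lemma pvFoldA_items (n : String) (fs : List String) :
    ∀ (K : List String) (N : String → PySem.Set String), K.Nodup → (∀ g, g ∉ K → N g = []) →
    (fs.foldl (pvStepA n) (PySem.Dict.mk (K.map fun g => (g, N g)))).items
      = (PySem.Set.update K fs).map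
          (fun g => (g, if fs.contains g then PySem.Set.add (N g) n else N g)) := by
  induction fs with
  | nil => intro K N hK h0; simp [PySem.Set.update]
  | cons f fs ih =>
    intro K N hK h0
    rw [List.foldl_cons, PySem.Dict.ext (pvStepA_items n f K N hK h0),
      ih (PySem.Set.add K f) _ (PySem.Set.nodup_add K f hK)
        (by
          intro g hg
          have hg' : ¬ (g ∈ K ∨ g = f) := fun h => hg ((PySem.Set.mem_add K f g).mpr h)
          have hfg : (f == g) = false := by
            simp only [beq_eq_false_iff_ne]; exact fun h => hg' (Or.inr h.symm)
          simp only [hfg, Bool.false_eq_true, if_false]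
          exact h0 g (fun h => hg' (Or.inl h))),
      PySem.Set.update_cons]
    congr 1
    funext g
    by_cases hgf : g = f
    · subst hgf
      have hmem : n ∈ PySem.Set.add (N g) n := (PySem.Set.mem_add (N g) n n).mpr (Or.inr rfl)
      simp
    · have h1 : (f == g) = false := by simpa using Ne.symm hgf
      have h2 : (g == f) = false := by simpa using hgf
      simp [hgf, h1]

lemma pvOuter_items (l : List (String × List String)) :
    (l.foldl (fun d p => p.2.foldl (pvStepA p.1) d) PySem.Dict.empty).items
      = (pvKeys l).map (fun g => (g, pvNodes l g)) := by
  induction l using List.reverseRecOn with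
  | nil => rfl
  | append_singleton l p ih =>
    rw [List.foldl_append, List.foldl_cons, List.foldl_nil, PySem.Dict.ext ih,
      pvFoldA_items p.1 p.2 (pvKeys l) (pvNodes l) (PySem.Set.nodup_ofList _)
        (fun g hg => pvNodes_not_mem l g (by simpa [pvKeys, PySem.Set.mem_ofList] using hg))]
    have hkeys : pvKeys (l ++ [p]) = PySem.Set.update (pvKeys l) p.2 := by
      unfold pvKeys
      rw [List.map_append, List.flatten_append, PySem.Set.ofList_append]
      simp
    have hnode : ∀ g, pvNodes (l ++ [p]) g
        = if p.2.contains g then PySem.Set.add (pvNodes l g) p.1 else pvNodes l g := by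
      intro g
      unfold pvNodes
      rw [List.filter_append, List.map_append]
      by_cases hpg : g ∈ p.2
      · rw [if_pos (by simpa using hpg)]
        have : List.filter (fun q => q.2.contains g) [p] = [p] := by simp [hpg]
        rw [this, PySem.Set.ofList_append]
        simp [PySem.Set.update]
      · rw [if_neg (by simpa using hpg)]
        have : List.filter (fun q => q.2.contains g) [p] = [] := by simp [hpg]
        rw [this]
        simp
    rw [hkeys]
    congr 1
    funext g
    rw [hnode]

-- ===== VERDICT (by name: the statement is the Claim_ definition above) =====
theorem map_functions_to_nodes_spec : Claim_equal_map_functions_to_nodes := by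
  intro l _
  show _ = _
  have hA : map_functions_to_nodes l
      = (l.foldl (fun d p => p.2.foldl (pvStepA p.1) d) PySem.Dict.empty).items := rfl
  have hB : map_functions_to_nodes_alt l = (pvKeys l).map (fun g => (g, pvNodes l g)) := rfl
  rw [hA, hB, pvOuter_items]
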